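-- pv_equiv track=rewrite | github.com/Luka0917/GOA-homeworks | group 34/level 147/classwork/classwork.py | matrixfy
-- ===== SOURCE A (Python) =====
-- def matrixfy(st):
--     if len(st) == 0:
--         return "name must be at least one letter"
--     n = 1
--     while n * n < len(st):
--         n += 1
--     padded = st + "." * (n * n - len(st))
--     matrix = []
--     for i in range(0, len(padded), n):
--         matrix.append(list(padded[i:i+n]))
--     return matrix
-- ===== SOURCE B (Python) =====
-- def _isqrt(x):
--     # integer square root by Newton's method (no imports, exact)
--     if x == 0:
--         return 0
--     r = x
--     y = (r + x // r) // 2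
--     while y < r:
--         r = y
--         y = (r + x // r) // 2
--     return r
--
--
-- def matrixfy(st):
--     L = len(st)
--     if L == 0:
--         return "name must be at least one letter"
--     r = _isqrt(L)
--     n = r if r * r == L else r + 1
--     return [[st[i * n + j] if i * n + j < L else "." for j in range(n)]
--             for i in range(n)]
-- ===== Notes on version B (the rewrite author's own statement) =====
-- stated objective: alternative
-- what changed: Replaces the incremental n*n<len search loop with a closed-form Newton integer square root, and builds each cell directly by index with a per-cell '.' default instead of constructing a padded string and slicing it row by row.
-- outside the precondition, e.g. on matrixfy(''): A returns 'name must be at least one letter', B returns 'name must be at least one letter'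
import Mathlib
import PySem

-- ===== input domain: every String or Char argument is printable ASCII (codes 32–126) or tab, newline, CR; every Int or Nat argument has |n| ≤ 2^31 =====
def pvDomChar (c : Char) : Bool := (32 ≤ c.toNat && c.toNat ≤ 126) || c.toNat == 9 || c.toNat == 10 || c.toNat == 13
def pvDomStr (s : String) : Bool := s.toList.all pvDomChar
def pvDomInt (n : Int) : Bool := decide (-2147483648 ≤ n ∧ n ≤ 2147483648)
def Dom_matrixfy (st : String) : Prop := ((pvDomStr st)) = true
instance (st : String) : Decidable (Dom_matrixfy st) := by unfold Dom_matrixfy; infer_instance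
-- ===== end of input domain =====

-- B replaces A's incremental 'while n*n < len' search with a Newton integer square root and
-- builds each cell directly by index (per-cell '.' default) instead of padding then slicing rows.

-- ===== PORT A =====
-- the 'while n * n < len(st): n += 1' loop of A
def findN (len n : Nat) : Nat :=
  if n * n < len then findN len (n + 1) else n
termination_by len - n
decreasing_by
  rename_i h
  rcases Nat.eq_zero_or_pos n with h0 | h0
  · subst h0; omega
  · have h1 : n ≤ n * n := Nat.le_mul_of_pos_left n h0
    omega

def matrixfy (st : String) : List (List String) :=
  let cs := st.toList
  if cs.length = 0 then []   -- A returns an error STRING here; outside Pre_matrixfy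
  else
    let n := findN cs.length 1
    let padded := cs ++ List.replicate (n * n - cs.length) '.'
    (PySem.List.pyRange 0 (padded.length : Int) (n : Int)).map (fun i =>
      (PySem.List.slice padded (some i) (some (i + (n : Int)))).map (fun c => String.ofList [c]))

-- ===== PORT B =====
-- Newton iteration of Source B's _isqrt: r := y; y := (r + x // r) // 2 while y < r
def isqrtLoop (x r : Nat) : Nat :=
  let y := (r + x / r) / 2
  if y < r then isqrtLoop x y else r
termination_by r

def isqrt (x : Nat) : Nat :=
  if x = 0 then 0 else isqrtLoop x x

def matrixfy_alt (st : String) : List (List String) :=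
  let cs := st.toList
  let L := cs.length
  if L = 0 then []   -- error-message branch of Source B; outside Pre_matrixfy
  else
    let r := isqrt L
    let n := if r * r = L then r else r + 1
    (List.range n).map (fun i =>
      (List.range n).map (fun j =>
        if i * n + j < L then String.ofList [cs.getD (i * n + j) '.'] else "."))

-- ===== PRECONDITION & SPEC =====
-- Pre_ excludes only the empty string, on which both Pythons return the error message
-- "name must be at least one letter" — a str, not a value of the declared matrix return type.
def Pre_matrixfy (st : String) : Prop := st ≠ ""
instance (st : String) : Decidable (Pre_matrixfy st) := by unfold Pre_matrixfy; infer_instance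
def pvWitness_matrixfy : String := "abcde"

def Spec_matrixfy (st : String) (out : List (List String)) : Prop := out = matrixfy_alt st
instance (st : String) (out : List (List String)) : Decidable (Spec_matrixfy st out) := by unfold Spec_matrixfy; infer_instance

-- ===== CLAIM (what is proved, stated in full; the proofs are below) =====
def Claim_equal_matrixfy : Prop := ∀ (st : String), Dom_matrixfy st → Pre_matrixfy st → Spec_matrixfy st (matrixfy st)

-- ===== LEMMAS AND PROOFS =====

-- A's search loop returns m whenever m is ≥ the start, big enough, and nothing between is
lemma findN_eq (L m : Nat) (hL : L ≤ m * m) :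
    ∀ d n, m - n = d → n ≤ m → (∀ k, n ≤ k → k < m → k * k < L) → findN L n = m := by
  intro d
  induction d with
  | zero =>
    intro n hd hnm hk
    have hnm' : n = m := by omega
    subst hnm'
    rw [findN, if_neg (by omega)]
  | succ d ih =>
    intro n hd hnm hk
    have hn : n < m := by omega
    rw [findN, if_pos (hk n le_rfl hn)]
    exact ih (n + 1) (by omega) (by omega) (fun k h1 h2 => hk k (by omega) h2)

-- Newton invariant: from any r ≥ √x, the next iterate stays ≥ √x
lemma newton_ge_sqrt (x r : Nat) (hx : 1 ≤ x) (hr : Nat.sqrt x ≤ r) :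
    Nat.sqrt x ≤ (r + x / r) / 2 := by
  have hs1 : 1 ≤ Nat.sqrt x := Nat.sqrt_pos.mpr hx
  have hr1 : 1 ≤ r := le_trans hs1 hr
  rw [Nat.le_div_iff_mul_le (by omega : 0 < 2)]
  by_cases hc : 2 * Nat.sqrt x ≤ r
  · exact le_trans (by omega) (Nat.le_add_right r (x / r))
  · set s := Nat.sqrt x with hs
    have hs2 : s * s ≤ x := by simpa [pow_two] using Nat.sqrt_le' x
    have hkey : (2 * s - r) * r + (r - s) * (r - s) = s * s := by
      have h1 : (2 * s - r) + (r - s) = s := by omega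
      have h2 : r = s + (r - s) := by omega
      set u := 2 * s - r
      set e := r - s
      rw [h2, ← h1]; ring
    have h3 : (2 * s - r) * r ≤ x := le_trans (by omega) hs2
    have h4 : 2 * s - r ≤ x / r := (Nat.le_div_iff_mul_le hr1).mpr h3
    omega

lemma isqrtLoop_eq (x : Nat) (hx : 1 ≤ x) :
    ∀ r : Nat, Nat.sqrt x ≤ r → isqrtLoop x r = Nat.sqrt x := by
  intro r
  induction r using Nat.strong_induction_on with
  | _ r ih =>
    intro hr
    rw [isqrtLoop]
    by_cases h : (r + x / r) / 2 < r
    · rw [if_pos h]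
      exact ih _ h (newton_ge_sqrt x r hx hr)
    · rw [if_neg h]
      have hr1 : 1 ≤ r := le_trans (Nat.sqrt_pos.mpr hx) hr
      have h2 : r * 2 ≤ r + x / r := (Nat.le_div_iff_mul_le (by omega : 0 < 2)).mp (not_lt.mp h)
      have h3 : r ≤ x / r := by omega
      have h4 : r * r ≤ x := (Nat.le_div_iff_mul_le hr1).mp h3
      have h5 : r ≤ Nat.sqrt x := Nat.le_sqrt.mpr h4
      omega

lemma isqrt_eq (x : Nat) : isqrt x = Nat.sqrt x := by
  unfold isqrt
  rcases Nat.eq_zero_or_pos x with h | h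
  · simp [h]
  · rw [if_neg (by omega)]
    exact isqrtLoop_eq x h x (Nat.sqrt_le_self x)

-- the two versions compute the same side length
lemma n_eq (L : Nat) (hL : 1 ≤ L) :
    findN L 1 = (if Nat.sqrt L * Nat.sqrt L = L then Nat.sqrt L else Nat.sqrt L + 1) := by
  set s := Nat.sqrt L with hs
  have hs1 : 1 ≤ s := Nat.sqrt_pos.mpr hL
  have hs2 : s * s ≤ L := by simpa [pow_two] using Nat.sqrt_le' L
  have hs3 : L < (s + 1) * (s + 1) := Nat.lt_succ_sqrt L
  by_cases h : s * s = L
  · rw [if_pos h]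
    exact findN_eq L s (by omega) (s - 1) 1 (by omega) hs1
      (fun k h1 h2 => by nlinarith)
  · rw [if_neg h]
    have hlt : s * s < L := by omega
    exact findN_eq L (s + 1) (by omega) s 1 (by omega) (by omega)
      (fun k h1 h2 => by nlinarith)

-- row i of A's pad-then-slice result is row i of B's per-cell construction
lemma row_eq (cs : List Char) (n i : Nat) (hLn : cs.length ≤ n * n) (hi : i < n) :
    (((cs ++ List.replicate (n * n - cs.length) '.').drop (i * n)).take n).map
        (fun c => String.ofList [c])
    = (List.range n).map (fun j =>
        if i * n + j < cs.length then String.ofList [cs.getD (i * n + j) '.'] else ".") := by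
  have hin : i * n + n ≤ n * n := by
    calc i * n + n = (i + 1) * n := by ring
    _ ≤ n * n := Nat.mul_le_mul_right n (by omega)
  apply List.ext_getElem
  · simp only [List.length_map, List.length_take, List.length_drop, List.length_append,
      List.length_replicate, List.length_range]
    omega
  · intro j h1 h2
    simp only [List.length_map, List.length_take, List.length_drop, List.length_append,
      List.length_replicate, List.length_range] at h1 h2
    simp only [List.getElem_map, List.getElem_take, List.getElem_drop, List.getElem_range]
    by_cases hj : i * n + j < cs.length
    · rw [if_pos hj, List.getElem_append_left hj, List.getD_eq_getElem cs '.' hj]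
    · rw [if_neg hj, List.getElem_append_right (by omega), List.getElem_replicate]

-- A's range(0, n*n, n) is [n*0, n*1, …, n*(n-1)]
lemma pyRange_step (n : Nat) (hn : 1 ≤ n) :
    PySem.List.pyRange 0 ((n * n : Nat) : Int) (n : Int)
      = (List.range n).map (fun (k : Nat) => (n : Int) * (k : Int)) := by
  have hn' : (0 : Int) < (n : Int) := by exact_mod_cast hn
  rw [PySem.List.pyRange_of_pos _ _ hn']
  rw [if_pos (by exact_mod_cast Nat.mul_pos hn hn : (0 : Int) < ((n * n : Nat) : Int))]
  have h1 : ((n * n : Nat) : Int) - 0 + (n : Int) - 1 = ((n : Int) - 1) + (n : Int) * (n : Int) := by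
    push_cast; ring
  rw [h1, Int.add_mul_ediv_left _ _ (ne_of_gt hn'),
    Int.ediv_eq_zero_of_lt (by omega) (by omega)]
  simp only [zero_add, Int.toNat_natCast]

theorem main_eq (st : String) (h : st ≠ "") : matrixfy st = matrixfy_alt st := by
  unfold matrixfy matrixfy_alt
  set cs := st.toList with hcs
  have hne : cs ≠ [] := by
    intro hc
    apply h
    calc st = String.ofList st.toList := String.ofList_toList.symm
      _ = String.ofList [] := by rw [← hcs, hc]
      _ = "" := rfl
  have hL : 1 ≤ cs.length := List.length_pos_iff.mpr hne
  simp only [isqrt_eq]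
  rw [if_neg (by omega), if_neg (by omega), ← n_eq cs.length hL]
  set n := findN cs.length 1 with hn
  have hnb : 1 ≤ n ∧ cs.length ≤ n * n := by
    rw [hn, n_eq cs.length hL]
    have hs1 : 1 ≤ Nat.sqrt cs.length := Nat.sqrt_pos.mpr hL
    have hs2 : Nat.sqrt cs.length * Nat.sqrt cs.length ≤ cs.length := by
      simpa [pow_two] using Nat.sqrt_le' cs.length
    have hs3 : cs.length < (Nat.sqrt cs.length + 1) * (Nat.sqrt cs.length + 1) :=
      Nat.lt_succ_sqrt cs.length
    split_ifs with he
    · exact ⟨hs1, by omega⟩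
    · exact ⟨by omega, by omega⟩
  have hlen : (cs ++ List.replicate (n * n - cs.length) '.').length = n * n := by
    simp only [List.length_append, List.length_replicate]; omega
  rw [hlen, pyRange_step n hnb.1, List.map_map]
  apply List.map_congr_left
  intro i hi
  have hi' : i < n := List.mem_range.mp hi
  show (PySem.List.slice _ (some ((n : Int) * i)) (some ((n : Int) * i + n))).map _ = _
  have hcast : ((n : Int) * i) = ((i * n : Nat) : Int) := by push_cast; ring
  rw [hcast, PySem.List.slice_natCast_add]
  exact row_eq cs n i hnb.2 hi'

-- ===== VERDICT (by name: the statement is the Claim_ definition above) =====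
theorem matrixfy_spec : Claim_equal_matrixfy := by
  intro st _ hpre
  exact main_eq st hpre
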